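-- pv_equiv track=rewrite | github.com/peterrakolcza/bme-mi | hazi2/hazi2.py | best_utility
-- ===== SOURCE A (Python) =====
-- def best_utility(decisionNum, p, u):
--     best_utility = 0
--     best_utility_index = 0
--     for key, e in u.items():
--             if key[1] == 0:
--                 best_utility += p[key[0]] * e
--
--     for i in range(decisionNum):
--         utility = 0
--         for key, e in u.items():
--             if key[1] == i:
--                 utility += p[key[0]] * e
--
--         if utility > best_utility:
--             best_utility = utility
--             best_utility_index = i
--
--     return best_utility_index
-- ===== SOURCE B (Python) =====
-- def best_utility(decisionNum, p, u):
--     acc = {}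
--     for key, e in u.items():
--         if key[1] == 0 or 0 <= key[1] < decisionNum:
--             acc[key[1]] = acc.get(key[1], 0) + p[key[0]] * e
--     best = acc.get(0, 0)
--     idx = 0
--     for i in range(decisionNum):
--         v = acc.get(i, 0)
--         if v > best:
--             best = v
--             idx = i
--     return idx
-- ===== Notes on version B (the rewrite author's own statement) =====
-- stated objective: faster
-- what changed: B makes one pass over u grouping p[k0]*e sums by decision key k1 into a dict, then scans the decisions once with O(1) lookups, instead of rescanning all of u for every decision index.
import Mathlib
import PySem

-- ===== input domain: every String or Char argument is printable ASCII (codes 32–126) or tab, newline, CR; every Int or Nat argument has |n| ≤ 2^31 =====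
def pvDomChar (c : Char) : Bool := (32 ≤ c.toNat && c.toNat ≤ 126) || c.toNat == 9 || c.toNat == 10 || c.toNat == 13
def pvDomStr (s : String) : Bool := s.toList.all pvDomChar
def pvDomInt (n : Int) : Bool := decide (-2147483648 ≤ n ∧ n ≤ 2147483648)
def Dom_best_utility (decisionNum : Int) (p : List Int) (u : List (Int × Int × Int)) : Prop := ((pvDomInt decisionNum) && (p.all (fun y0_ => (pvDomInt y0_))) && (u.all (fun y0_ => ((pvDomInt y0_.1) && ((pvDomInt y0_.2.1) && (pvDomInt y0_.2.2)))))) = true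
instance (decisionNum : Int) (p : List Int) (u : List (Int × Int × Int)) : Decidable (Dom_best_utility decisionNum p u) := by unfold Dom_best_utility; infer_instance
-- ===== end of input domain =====

-- B replaces A's rescan of u for every decision index by one grouping pass over u
-- (sums of p[k0]*e keyed by k1 in a dict) followed by a single scan of the decisions (faster).

-- ===== PORT A =====
def best_utility (decisionNum : Int) (p : List Int) (u : List (Int × Int × Int)) : Int :=
  -- first loop: best_utility starts 0, sums p[key[0]]*e over entries with key[1] == 0
  let best0 : Int :=
    u.foldl (fun acc x => if x.2.1 == 0 then acc + PySem.List.pyGetD p x.1 0 * x.2.2 else acc) 0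
  -- second loop over range(decisionNum), recomputing utility for each i
  let r : Int × Int :=
    (PySem.List.pyRange 0 decisionNum 1).foldl
      (fun s i =>
        let utility : Int :=
          u.foldl (fun acc x => if x.2.1 == i then acc + PySem.List.pyGetD p x.1 0 * x.2.2 else acc) 0
        if utility > s.1 then (utility, i) else s)
      (best0, 0)
  r.2

-- ===== PORT B =====
-- one grouping pass over the relevant keys: acc[k1] = acc.get(k1, 0) + p[k0]*e
def pvAcc (decisionNum : Int) (p : List Int) (u : List (Int × Int × Int)) : PySem.Dict Int Int :=
  u.foldl (fun d x =>
      if x.2.1 == 0 || (decide (0 ≤ x.2.1) && decide (x.2.1 < decisionNum)) then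
        d.modify x.2.1 0 (fun v => v + PySem.List.pyGetD p x.1 0 * x.2.2)
      else d)
    PySem.Dict.empty

def best_utility_alt (decisionNum : Int) (p : List Int) (u : List (Int × Int × Int)) : Int :=
  let acc := pvAcc decisionNum p u
  let r : Int × Int :=
    (PySem.List.pyRange 0 decisionNum 1).foldl
      (fun s i =>
        let v := acc.getD i 0
        if v > s.1 then (v, i) else s)
      (acc.getD 0 0, 0)
  r.2

-- ===== PRECONDITION & SPEC =====
-- Pre_ excludes exactly the inputs where Python's p[key[0]] raises IndexError, i.e. an
-- out-of-range k0 on an entry whose key k1 the loops actually reach (k1 = 0 or 0 ≤ k1 < decisionNum).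
def Pre_best_utility (decisionNum : Int) (p : List Int) (u : List (Int × Int × Int)) : Prop :=
  ∀ x ∈ u, (x.2.1 = 0 ∨ (0 ≤ x.2.1 ∧ x.2.1 < decisionNum)) → PySem.Raise.InRange p.length x.1
instance (decisionNum : Int) (p : List Int) (u : List (Int × Int × Int)) : Decidable (Pre_best_utility decisionNum p u) := by unfold Pre_best_utility; infer_instance

def pvWitness_best_utility : Int × List Int × (List (Int × Int × Int)) :=
  (2, [1, 2], [(0, 0, 3), (1, 1, 5)])

def Spec_best_utility (decisionNum : Int) (p : List Int) (u : List (Int × Int × Int)) (out : Int) : Prop := out = best_utility_alt decisionNum p u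
instance (decisionNum : Int) (p : List Int) (u : List (Int × Int × Int)) (out : Int) : Decidable (Spec_best_utility decisionNum p u out) := by unfold Spec_best_utility; infer_instance

-- ===== CLAIM (what is proved, stated in full; the proofs are below) =====
def Claim_equal_best_utility : Prop := ∀ (decisionNum : Int) (p : List Int) (u : List (Int × Int × Int)), Dom_best_utility decisionNum p u → Pre_best_utility decisionNum p u → Spec_best_utility decisionNum p u (best_utility decisionNum p u)

-- ===== LEMMAS AND PROOFS =====

-- for a relevant index i, the grouped dict entry at i equals A's filtered sum over u
theorem pvAcc_getD (decisionNum : Int) (p : List Int) (u : List (Int × Int × Int)) (i : Int)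
    (hi : i = 0 ∨ (0 ≤ i ∧ i < decisionNum)) (d : PySem.Dict Int Int) :
    (u.foldl (fun d x =>
        if x.2.1 == 0 || (decide (0 ≤ x.2.1) && decide (x.2.1 < decisionNum)) then
          d.modify x.2.1 0 (fun v => v + PySem.List.pyGetD p x.1 0 * x.2.2)
        else d) d).getD i 0
    = u.foldl (fun acc x => if x.2.1 == i then acc + PySem.List.pyGetD p x.1 0 * x.2.2 else acc) (d.getD i 0) := by
  induction u generalizing d with
  | nil => rfl
  | cons x rest ih =>
    simp only [List.foldl_cons, ih]
    by_cases h : x.2.1 = i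
    · subst h
      have : (x.2.1 == 0 || (decide (0 ≤ x.2.1) && decide (x.2.1 < decisionNum))) = true := by
        rcases hi with h0 | ⟨h1, h2⟩
        · simp [h0]
        · simp [h1, h2]
      rw [this]
      simp only [beq_self_eq_true, if_true]
      rw [PySem.Dict.getD_modify_self]
    · by_cases hg : (x.2.1 == 0 || (decide (0 ≤ x.2.1) && decide (x.2.1 < decisionNum))) = true
      · rw [hg]
        simp only [if_true]
        rw [PySem.Dict.getD_modify_of_ne _ _ _ (fun hc => h hc.symm)]
        simp [h]
      · simp only [hg]
        simp [h]

theorem pvAcc_getD' (decisionNum : Int) (p : List Int) (u : List (Int × Int × Int)) (i : Int)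
    (hi : i = 0 ∨ (0 ≤ i ∧ i < decisionNum)) :
    (pvAcc decisionNum p u).getD i 0
    = u.foldl (fun acc x => if x.2.1 == i then acc + PySem.List.pyGetD p x.1 0 * x.2.2 else acc) 0 := by
  unfold pvAcc
  rw [pvAcc_getD decisionNum p u i hi]
  rfl

-- ===== VERDICT (by name: the statement is the Claim_ definition above) =====
theorem best_utility_spec : Claim_equal_best_utility := by
  intro decisionNum p u _ _
  unfold Spec_best_utility best_utility best_utility_alt
  simp only
  rw [pvAcc_getD' decisionNum p u 0 (Or.inl rfl)]
  rw [PySem.List.foldl_congr_mem]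
  intro s i hi
  rw [PySem.List.mem_pyRange_one] at hi
  rw [pvAcc_getD' decisionNum p u i (Or.inr hi)]
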